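-- pv_equiv track=rewrite | github.com/Takuma2025/english_words | convert_csv_to_vocabulary.py | get_next_id_for_category
-- ===== SOURCE A (Python) =====
-- CATEGORY_ID_RANGES = {
--     'level1': (30001, 30399),
--     'level2': (30401, 30699),
--     'level3': (30701, 30899),
--     'level4': (31001, 31299),
--     'level5': (31301, 31599),
--     'LEVEL1 超重要単語400': (30001, 30399),
--     'LEVEL2 重要単語300': (30401, 30699),
--     'LEVEL3 差がつく単語200': (30701, 30899),
--     'LEVEL4 私立高校入試レベル': (31001, 31299),
--     'LEVEL5 難関私立高校入試レベル': (31301, 31599),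
-- }
--
-- def get_next_id_for_category(category: str, used_ids: set) -> int:
--     """カテゴリーに基づいて次のIDを生成"""
--     category_lower = category.lower().strip()
--
--     if category_lower in CATEGORY_ID_RANGES:
--         start_id, end_id = CATEGORY_ID_RANGES[category_lower]
--         for id_num in range(start_id, end_id + 1):
--             if id_num not in used_ids:
--                 return id_num
--
--     # カテゴリーが定義されていない場合、30000番台から開始
--     for id_num in range(30000, 40000):
--         if id_num not in used_ids:
--             return id_num
--
--     # それでも見つからない場合、既存の最大ID+1
--     return max(used_ids) + 1 if used_ids else 30001
-- ===== SOURCE B (Python) =====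
-- CATEGORY_ID_RANGES = {
--     'level1': (30001, 30399),
--     'level2': (30401, 30699),
--     'level3': (30701, 30899),
--     'level4': (31001, 31299),
--     'level5': (31301, 31599),
--     'LEVEL1 超重要単語400': (30001, 30399),
--     'LEVEL2 重要単語300': (30401, 30699),
--     'LEVEL3 差がつく単語200': (30701, 30899),
--     'LEVEL4 私立高校入試レベル': (31001, 31299),
--     'LEVEL5 難関私立高校入試レベル': (31301, 31599),
-- }
--
-- def get_next_id_for_category(category: str, used_ids: set) -> int:
--     """Set-difference formulation: minimum of the complement per stage."""
--     key = category.lower().strip()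
--     stages = []
--     if key in CATEGORY_ID_RANGES:
--         s, e = CATEGORY_ID_RANGES[key]
--         stages.append(range(s, e + 1))
--     stages.append(range(30000, 40000))
--     for stage in stages:
--         free = set(stage) - set(used_ids)
--         if free:
--             return min(free)
--     return max(used_ids) + 1 if used_ids else 30001
-- ===== Notes on version B (the rewrite author's own statement) =====
-- stated objective: alternative
-- what changed: Replaces the two probe-in-order loops with early return by a uniform stage list whose free candidate set is computed by set difference and answered with min(), falling through on an empty complement.
import Mathlib
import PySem

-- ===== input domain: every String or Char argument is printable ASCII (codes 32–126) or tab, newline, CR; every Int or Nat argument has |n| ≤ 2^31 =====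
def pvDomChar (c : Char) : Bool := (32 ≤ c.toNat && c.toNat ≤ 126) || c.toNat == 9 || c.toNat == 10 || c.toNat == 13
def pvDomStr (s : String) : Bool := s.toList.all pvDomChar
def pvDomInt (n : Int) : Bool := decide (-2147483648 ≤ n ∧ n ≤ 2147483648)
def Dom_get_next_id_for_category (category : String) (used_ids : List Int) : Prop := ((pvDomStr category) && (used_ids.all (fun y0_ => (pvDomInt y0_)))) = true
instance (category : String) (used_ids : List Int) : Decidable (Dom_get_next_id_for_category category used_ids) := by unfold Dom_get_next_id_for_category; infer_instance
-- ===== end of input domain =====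

-- B replaces A's probe-each-id-in-order loops by per-stage set difference answered with min(); same return value, alternative decomposition.

-- ===== PORT A =====
-- module constant CATEGORY_ID_RANGES (shared data table, used by both ports)
def CATEGORY_ID_RANGES : PySem.Dict String (Int × Int) :=
  PySem.Dict.ofList [
    ("level1", (30001, 30399)),
    ("level2", (30401, 30699)),
    ("level3", (30701, 30899)),
    ("level4", (31001, 31299)),
    ("level5", (31301, 31599)),
    ("LEVEL1 超重要単語400", (30001, 30399)),
    ("LEVEL2 重要単語300", (30401, 30699)),
    ("LEVEL3 差がつく単語200", (30701, 30899)),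
    ("LEVEL4 私立高校入試レベル", (31001, 31299)),
    ("LEVEL5 難関私立高校入試レベル", (31301, 31599))]

def get_next_id_for_category (category : String) (used_ids : List Int) : Int :=
  let category_lower := PySem.Str.strip (PySem.Str.lower category)
  -- 'for id_num in range(start_id, end_id+1): if id_num not in used_ids: return id_num' = find? (first unused)
  let fromCat : Option Int :=
    match PySem.Dict.get? CATEGORY_ID_RANGES category_lower with
    | some (start_id, end_id) =>
        List.find? (fun i => !used_ids.contains i) (PySem.List.pyRange start_id (end_id + 1) 1)
    | none => none
  match fromCat with
  | some i => i
  | none =>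
    match List.find? (fun i => !used_ids.contains i) (PySem.List.pyRange 30000 40000 1) with
    | some i => i
    | none =>
      match PySem.List.max? used_ids (fun x => x) with
      | some m => m + 1
      | none => 30001

-- ===== PORT B =====
-- 'set(stage) - set(used_ids)' then 'min(free)' if non-empty, else fall through (none)
def pvFreeMin (used : List Int) (a b : Int) : Option Int :=
  PySem.List.min? ((PySem.List.pyRange a b 1).filter (fun i => !used.contains i)) (fun x => x)

def get_next_id_for_category_alt (category : String) (used_ids : List Int) : Int :=
  let key := PySem.Str.strip (PySem.Str.lower category)
  let stages : List (Int × Int) :=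
    (match PySem.Dict.get? CATEGORY_ID_RANGES key with
     | some (s, e) => [(s, e + 1)]
     | none => []) ++ [(30000, 40000)]
  match stages.findSome? (fun p => pvFreeMin used_ids p.1 p.2) with
  | some i => i
  | none =>
    match PySem.List.max? used_ids (fun x => x) with
    | some m => m + 1
    | none => 30001

-- ===== PRECONDITION & SPEC =====
def Spec_get_next_id_for_category (category : String) (used_ids : List Int) (out : Int) : Prop := out = get_next_id_for_category_alt category used_ids
instance (category : String) (used_ids : List Int) (out : Int) : Decidable (Spec_get_next_id_for_category category used_ids out) := by unfold Spec_get_next_id_for_category; infer_instance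

-- ===== CLAIM (what is proved, stated in full; the proofs are below) =====
def Claim_equal_get_next_id_for_category : Prop := ∀ (category : String) (used_ids : List Int), Dom_get_next_id_for_category category used_ids → Spec_get_next_id_for_category category used_ids (get_next_id_for_category category used_ids)

-- ===== LEMMAS AND PROOFS =====

theorem pvFind?_eq_head?_filter {α : Type} (p : α → Bool) (l : List α) :
    l.find? p = (l.filter p).head? := by
  induction l with
  | nil => rfl
  | cons x t ih =>
    by_cases h : p x = true
    · rw [List.find?_cons_of_pos h, List.filter_cons_of_pos h]; rfl
    · rw [List.find?_cons_of_neg h, List.filter_cons_of_neg h]; exact ih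

theorem pvFoldl_min_eq_self {x : Int} {t : List Int} (h : ∀ y ∈ t, x ≤ y) :
    t.foldl min x = x := by
  induction t generalizing x with
  | nil => rfl
  | cons y t ih =>
    have hxy : min x y = x := min_eq_left (h y (by simp))
    simp only [List.foldl_cons, hxy]
    exact ih (fun z hz => h z (by simp [hz]))

theorem pvMin?_id_eq_head? {l : List Int} (h : l.Pairwise (· < ·)) :
    PySem.List.min? l (fun y => y) = l.head? := by
  cases l with
  | nil => exact (PySem.List.min?_eq_none_iff _ _).mpr rfl
  | cons x t =>
    rw [PySem.List.min?_id_cons]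
    have hle : ∀ y ∈ t, x ≤ y := fun y hy => le_of_lt ((List.pairwise_cons.mp h).1 y hy)
    simp [pvFoldl_min_eq_self hle]

theorem pvStage_eq (used : List Int) (a b : Int) :
    List.find? (fun i => !used.contains i) (PySem.List.pyRange a b 1) = pvFreeMin used a b := by
  unfold pvFreeMin
  rw [pvFind?_eq_head?_filter,
      pvMin?_id_eq_head? ((PySem.List.pairwise_lt_pyRange_one a b).filter _)]

-- ===== VERDICT (by name: the statement is the Claim_ definition above) =====
theorem get_next_id_for_category_spec : Claim_equal_get_next_id_for_category := by
  intro category used_ids _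
  unfold Spec_get_next_id_for_category get_next_id_for_category get_next_id_for_category_alt
  cases hk : PySem.Dict.get? CATEGORY_ID_RANGES (PySem.Str.strip (PySem.Str.lower category)) with
  | none =>
    rw [pvStage_eq]
    simp only [hk, List.nil_append, List.findSome?_cons, List.findSome?_nil]
    cases pvFreeMin used_ids 30000 40000 <;> rfl
  | some se =>
    obtain ⟨s, e⟩ := se
    simp only [hk, List.cons_append, List.nil_append, List.findSome?_cons, List.findSome?_nil]
    rw [pvStage_eq, pvStage_eq]
    cases pvFreeMin used_ids s (e + 1) <;>
      [skip; rfl] <;> cases pvFreeMin used_ids 30000 40000 <;> rfl
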